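-- pv_equiv track=rewrite | github.com/Prostream/leetCodePractice | OA preparation/imageFilter.py | getMinProcessingCost
-- ===== SOURCE A (Python) =====
-- def getMinProcessingCost(filterCost, startDay, endDay, discountPrice):
--     """
--     :param filterCost: List[int], 第 i 张图像的单日处理费用
--     :param startDay:   List[int], 第 i 张图像开始处理的日期
--     :param endDay:     List[int], 第 i 张图像结束处理的日期（含）
--     :param discountPrice: int, 当天对所有图像统一处理时的折扣总价
--     :return: int, 最小总费用 % (10^9 + 7)
--     """
--     import sys
--     from collections import defaultdict
--
--     MOD = 10 ** 9 + 7
--     n = len(filterCost)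
--
--     # 1) 收集事件：+cost 表示从该天起多了一张图要处理；-cost 表示该天起少了一张图要处理
--     events = defaultdict(int)
--     for i in range(n):
--         events[startDay[i]] += filterCost[i]  # 开始日
--         # “结束日+1”这天不再需要处理该图像
--         # 注意要防止潜在溢出，Python int 无上限一般没问题，但若语言有限制需判一下 endDay[i]+1 是否越界
--         events[endDay[i] + 1] -= filterCost[i]
--
--     # 2) 将所有事件天按升序排好
--     days = sorted(events.keys())
--
--     total_cost = 0
--     runningCost = 0  # 当前需要处理的图像费用总和
--     prevDay = None  # 上一个事件日
--
--     # 3) 线性扫描事件日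
--     for day in days:
--         if prevDay is not None:
--             # 区间 [prevDay, day) 这几天的费用相同
--             length = day - prevDay
--             # 对这段天数，每天付费可选 runningCost(逐图像) 或 discountPrice(打包价)
--             dailyCost = min(runningCost, discountPrice)
--             total_cost = (total_cost + dailyCost * length) % MOD
--
--         # 更新本日的变动（某些图像开始或结束）
--         runningCost += events[day]
--         prevDay = day
--
--     return total_cost % MOD
-- ===== SOURCE B (Python) =====
-- def getMinProcessingCost(filterCost, startDay, endDay, discountPrice):
--     MOD = 10 ** 9 + 7
--     n = len(filterCost)
--     # distinct boundary days where the active cost can change, ascending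
--     days = sorted({startDay[i] for i in range(n)} | {endDay[i] + 1 for i in range(n)})
--     total = 0
--     for d1, d2 in zip(days, days[1:]):
--         # cost active throughout [d1, d2): images already started minus images already finished
--         started = sum(filterCost[i] for i in range(n) if startDay[i] <= d1)
--         finished = sum(filterCost[i] for i in range(n) if endDay[i] < d1)
--         total += min(started - finished, discountPrice) * (d2 - d1)
--     return total % MOD
-- ===== Notes on version B (the rewrite author's own statement) =====
-- stated objective: simpler
-- what changed: Replaces the defaultdict difference-map with running prefix sum by a sort of the distinct boundary days and a direct per-segment recount of the active cost (started-minus-finished scans), with a single final modulus.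
import Mathlib
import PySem

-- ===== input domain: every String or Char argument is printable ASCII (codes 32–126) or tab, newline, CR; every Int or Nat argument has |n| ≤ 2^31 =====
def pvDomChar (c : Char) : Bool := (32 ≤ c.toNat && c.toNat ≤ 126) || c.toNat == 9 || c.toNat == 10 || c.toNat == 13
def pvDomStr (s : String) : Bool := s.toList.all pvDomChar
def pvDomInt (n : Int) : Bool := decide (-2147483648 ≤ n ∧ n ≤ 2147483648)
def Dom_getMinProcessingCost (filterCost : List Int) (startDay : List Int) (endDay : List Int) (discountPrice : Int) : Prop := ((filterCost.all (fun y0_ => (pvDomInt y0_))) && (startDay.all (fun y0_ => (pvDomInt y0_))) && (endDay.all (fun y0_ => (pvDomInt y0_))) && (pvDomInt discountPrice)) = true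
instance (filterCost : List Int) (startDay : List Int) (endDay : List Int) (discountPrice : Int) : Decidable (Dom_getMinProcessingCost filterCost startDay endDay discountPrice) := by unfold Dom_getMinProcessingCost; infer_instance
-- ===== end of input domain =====

-- B replaces A's defaultdict event map + running prefix sum by sorting the distinct
-- boundary days and recounting the active cost per segment with direct scans (objective: simpler).

-- ===== PORT A =====
def getMinProcessingCost (filterCost : List Int) (startDay : List Int) (endDay : List Int) (discountPrice : Int) : Int :=
  let M : Int := 1000000007
  let n : Int := (filterCost.length : Int)
  -- events = defaultdict(int); for i in range(n): events[startDay[i]] += filterCost[i]; events[endDay[i]+1] -= filterCost[i]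
  let events : PySem.Dict Int Int :=
    (PySem.List.pyRange 0 n 1).foldl (fun d i =>
      (d.modify (PySem.List.pyGetD startDay i 0) 0 (· + PySem.List.pyGetD filterCost i 0)).modify
        (PySem.List.pyGetD endDay i 0 + 1) 0 (· - PySem.List.pyGetD filterCost i 0))
      PySem.Dict.empty
  -- days = sorted(events.keys())
  let days : List Int := PySem.List.sorted events.keys (fun x => x) false
  -- scan: state (total_cost, runningCost, prevDay)
  let st : Int × Int × Option Int := days.foldl (fun st day =>
      let total := match st.2.2 with
        | none => st.1
        | some p => PySem.Int.mod (st.1 + min st.2.1 discountPrice * (day - p)) M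
      (total, st.2.1 + events.getD day 0, some day)) (0, 0, none)
  PySem.Int.mod st.1 M

-- ===== PORT B =====
def getMinProcessingCost_alt (filterCost : List Int) (startDay : List Int) (endDay : List Int) (discountPrice : Int) : Int :=
  let M : Int := 1000000007
  let n : Int := (filterCost.length : Int)
  -- days = sorted({startDay[i] for i in range(n)} | {endDay[i] + 1 for i in range(n)})
  let days : List Int := PySem.List.sorted
    (PySem.Set.union (PySem.Set.ofList ((PySem.List.pyRange 0 n 1).map (fun i => PySem.List.pyGetD startDay i 0)))
      ((PySem.List.pyRange 0 n 1).map (fun i => PySem.List.pyGetD endDay i 0 + 1)))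
    (fun x => x) false
  -- for d1, d2 in zip(days, days[1:]): total += min(started - finished, discountPrice) * (d2 - d1)
  let total : Int := (days.zip (PySem.List.slice days (some 1) none)).foldl (fun tot p =>
      let started := (((PySem.List.pyRange 0 n 1).filter (fun i => decide (PySem.List.pyGetD startDay i 0 ≤ p.1))).map
        (fun i => PySem.List.pyGetD filterCost i 0)).sum
      let finished := (((PySem.List.pyRange 0 n 1).filter (fun i => decide (PySem.List.pyGetD endDay i 0 < p.1))).map
        (fun i => PySem.List.pyGetD filterCost i 0)).sum
      tot + min (started - finished) discountPrice * (p.2 - p.1)) 0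
  PySem.Int.mod total M

-- ===== PRECONDITION & SPEC =====
-- A raises IndexError exactly when startDay or endDay is shorter than filterCost; those inputs are excluded.
def Pre_getMinProcessingCost (filterCost : List Int) (startDay : List Int) (endDay : List Int) (discountPrice : Int) : Prop :=
  filterCost.length ≤ startDay.length ∧ filterCost.length ≤ endDay.length
instance (filterCost : List Int) (startDay : List Int) (endDay : List Int) (discountPrice : Int) : Decidable (Pre_getMinProcessingCost filterCost startDay endDay discountPrice) := by unfold Pre_getMinProcessingCost; infer_instance
def pvWitness_getMinProcessingCost : List Int × List Int × List Int × Int := ([2, 3], [1, 2], [3, 4], 4)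

def Spec_getMinProcessingCost (filterCost : List Int) (startDay : List Int) (endDay : List Int) (discountPrice : Int) (out : Int) : Prop := out = getMinProcessingCost_alt filterCost startDay endDay discountPrice
instance (filterCost : List Int) (startDay : List Int) (endDay : List Int) (discountPrice : Int) (out : Int) : Decidable (Spec_getMinProcessingCost filterCost startDay endDay discountPrice out) := by unfold Spec_getMinProcessingCost; infer_instance

-- ===== CLAIM (what is proved, stated in full; the proofs are below) =====
def Claim_equal_getMinProcessingCost : Prop := ∀ (filterCost : List Int) (startDay : List Int) (endDay : List Int) (discountPrice : Int), Dom_getMinProcessingCost filterCost startDay endDay discountPrice → Pre_getMinProcessingCost filterCost startDay endDay discountPrice → Spec_getMinProcessingCost filterCost startDay endDay discountPrice (getMinProcessingCost filterCost startDay endDay discountPrice)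

-- ===== LEMMAS AND PROOFS =====

-- the flattened event list: per index i the two (day, delta) events A records
def pvPairs (c s e : Int → Int) (idx : List Int) : List (Int × Int) :=
  idx.flatMap (fun i => [(s i, c i), (e i + 1, -(c i))])

-- net delta recorded at day k (= events[k])
def pvG (l : List (Int × Int)) (k : Int) : Int := ((l.filter (fun r => r.1 == k)).map Prod.snd).sum

-- prefix sum of all deltas at days ≤ d (= A's runningCost after day d, = B's active cost)
def pvAct (l : List (Int × Int)) (d : Int) : Int := ((l.filter (fun r => decide (r.1 ≤ d))).map Prod.snd).sum

-- total over the remaining segments, previous event day p, upcoming event days ds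
def pvSeg (disc : Int) (l : List (Int × Int)) : Int → List Int → Int
  | _, [] => 0
  | p, d :: ds => min (pvAct l p) disc * (d - p) + pvSeg disc l d ds

-- A's loop body, with the day→delta function abstracted
def pvStepA (disc M : Int) (g : Int → Int) (st : Int × Int × Option Int) (day : Int) : Int × Int × Option Int :=
  ((match st.2.2 with
    | none => st.1
    | some p => PySem.Int.mod (st.1 + min st.2.1 disc * (day - p)) M),
   st.2.1 + g day, some day)

theorem pvPairs_cons (c s e : Int → Int) (i : Int) (idx : List Int) :
    pvPairs c s e (i :: idx) = (s i, c i) :: (e i + 1, -(c i)) :: pvPairs c s e idx := by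
  simp [pvPairs]

theorem pv_events_eq (c s e : Int → Int) (idx : List Int) (d0 : PySem.Dict Int Int) :
    idx.foldl (fun d i => (d.modify (s i) 0 (· + c i)).modify (e i + 1) 0 (· - c i)) d0
      = (pvPairs c s e idx).foldl (fun d r => d.modify r.1 0 (· + r.2)) d0 := by
  simp only [sub_eq_add_neg]
  induction idx generalizing d0 with
  | nil => simp [pvPairs]
  | cons i idx ih => simp only [pvPairs_cons, List.foldl_cons]; exact ih _

theorem pv_modfold_getD (l : List (Int × Int)) (d : PySem.Dict Int Int) (k : Int) :
    (l.foldl (fun d r => d.modify r.1 0 (· + r.2)) d).getD k 0 = d.getD k 0 + pvG l k := by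
  induction l generalizing d with
  | nil => simp [pvG]
  | cons r l ih =>
      simp only [List.foldl_cons, ih, pvG, List.filter_cons]
      rw [PySem.Dict.getD_modify]
      by_cases h : r.1 = k
      · simp [h]; ring
      · simp [h, Ne.symm h]

theorem pv_modfold_keys (l : List (Int × Int)) :
    (l.foldl (fun d r => d.modify r.1 0 (· + r.2)) PySem.Dict.empty).keys
      = PySem.Set.ofList (l.map Prod.fst) := by
  have h := PySem.Dict.keys_foldl_modify_key l Prod.fst 0 (fun _ r v => v + r.2) PySem.Dict.empty
  simpa [PySem.Set.ofList_eq_foldl, PySem.Set.update] using h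

theorem pv_act_split (l : List (Int × Int)) (p q : Int) (hpq : p < q)
    (hk : ∀ k ∈ l.map Prod.fst, p < k → k ≤ q → k = q) :
    pvAct l q = pvAct l p + pvG l q := by
  induction l with
  | nil => simp [pvAct, pvG]
  | cons r l ih =>
      have hk' : ∀ k ∈ l.map Prod.fst, p < k → k ≤ q → k = q := by
        intro k hkm; exact hk k (by simp [hkm])
      have hr := hk r.1 (by simp)
      have ihe := ih hk'
      simp only [pvAct, pvG, List.filter_cons] at ihe ⊢
      by_cases h1 : r.1 ≤ q
      · by_cases h2 : r.1 ≤ p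
        · by_cases h3 : r.1 = q
          · omega
          · simp [h1, h2, h3]
            omega
        · by_cases h3 : r.1 = q
          · simp [h3, show ¬ (q ≤ p) by omega]
            omega
          · exact absurd (hr (by omega) h1) h3
      · by_cases h2 : r.1 ≤ p
        · omega
        · by_cases h3 : r.1 = q
          · omega
          · simp [h1, h2, h3]
            omega

theorem pv_act_bot (l : List (Int × Int)) (p : Int)
    (h : ∀ k ∈ l.map Prod.fst, ¬ k ≤ p) : pvAct l p = 0 := by
  have hnil : l.filter (fun r => decide (r.1 ≤ p)) = [] := by
    rw [List.filter_eq_nil_iff]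
    intro r hr
    simpa using h r.1 (List.mem_map_of_mem hr)
  simp [pvAct, hnil]

theorem pv_act_head (l : List (Int × Int)) (d0 : Int)
    (h : ∀ k ∈ l.map Prod.fst, d0 ≤ k) : pvAct l d0 = pvG l d0 := by
  have h1 := pv_act_split l (d0 - 1) d0 (by omega) (by intro k hk _ h2; have := h k hk; omega)
  have h2 := pv_act_bot l (d0 - 1) (by intro k hk; have := h k hk; omega)
  omega

theorem pv_act_B (c s e : Int → Int) (idx : List Int) (d : Int) :
    pvAct (pvPairs c s e idx) d
      = ((idx.filter (fun i => decide (s i ≤ d))).map c).sum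
        - ((idx.filter (fun i => decide (e i < d))).map c).sum := by
  induction idx with
  | nil => simp [pvPairs, pvAct]
  | cons i idx ih =>
      have h2' : (e i + 1 ≤ d) ↔ (e i < d) := by omega
      simp only [pvPairs_cons, pvAct, List.filter_cons] at ih ⊢
      by_cases h1 : s i ≤ d <;> by_cases h2 : e i < d <;>
        simp [h1, h2, h2'] <;> omega

theorem pv_mem_fst (c s e : Int → Int) (R : List Int) (x : Int) :
    x ∈ (pvPairs c s e R).map Prod.fst ↔ x ∈ R.map s ∨ x ∈ R.map (fun i => e i + 1) := by
  simp only [pvPairs, List.map_flatMap, List.mem_flatMap, List.mem_map, List.map_cons,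
    List.map_nil, List.mem_cons, List.not_mem_nil, or_false]
  constructor
  · rintro ⟨i, hi, h | h⟩
    · exact Or.inl ⟨i, hi, h.symm⟩
    · exact Or.inr ⟨i, hi, h.symm⟩
  · rintro (⟨i, hi, hx⟩ | ⟨i, hi, hx⟩)
    · exact ⟨i, hi, Or.inl hx.symm⟩
    · exact ⟨i, hi, Or.inr hx.symm⟩

theorem pv_loopA (disc M : Int) (hM : 0 < M) (l : List (Int × Int)) :
    ∀ (ds : List Int) (p t : Int), (∀ d ∈ ds, p < d) →
    (∀ k, k ∈ l.map Prod.fst → p < k → k ∈ ds) → ds.Pairwise (· < ·) →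
    (ds.foldl (pvStepA disc M (pvG l)) (PySem.Int.mod t M, pvAct l p, some p)).1
      = PySem.Int.mod (t + pvSeg disc l p ds) M := by
  intro ds
  induction ds with
  | nil => intro p t _ _ _; simp [pvSeg]
  | cons q ds ih =>
      intro p t hlt hkeys hpw
      have hpq : p < q := hlt q (by simp)
      have hact : pvAct l q = pvAct l p + pvG l q := by
        apply pv_act_split l p q hpq
        intro k hk h1 h2
        rcases List.mem_cons.mp (hkeys k hk h1) with h | h
        · exact h
        · exfalso; have := (List.pairwise_cons.mp hpw).1 k h; omega
      have hmm : PySem.Int.mod (PySem.Int.mod t M + min (pvAct l p) disc * (q - p)) M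
          = PySem.Int.mod (t + min (pvAct l p) disc * (q - p)) M := by
        simp only [PySem.Int.mod_eq_emod_of_pos hM]
        conv_rhs => rw [Int.add_emod]
        rw [Int.add_emod, Int.emod_emod_of_dvd _ dvd_rfl]
      calc ((q :: ds).foldl (pvStepA disc M (pvG l)) (PySem.Int.mod t M, pvAct l p, some p)).1
          = (ds.foldl (pvStepA disc M (pvG l))
              (PySem.Int.mod (t + min (pvAct l p) disc * (q - p)) M, pvAct l q, some q)).1 := by
            simp only [List.foldl_cons, pvStepA, hmm, hact]
        _ = PySem.Int.mod ((t + min (pvAct l p) disc * (q - p)) + pvSeg disc l q ds) M := by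
            apply ih
            · exact fun d hd => (List.pairwise_cons.mp hpw).1 d hd
            · intro k hk hqk
              rcases List.mem_cons.mp (hkeys k hk (by omega)) with h | h
              · omega
              · exact h
            · exact (List.pairwise_cons.mp hpw).2
        _ = PySem.Int.mod (t + pvSeg disc l p (q :: ds)) M := by
            simp [pvSeg, add_assoc]

theorem pv_loopB (disc : Int) (l : List (Int × Int)) :
    ∀ (ds : List Int) (p acc : Int),
    (((p :: ds).zip ds).foldl (fun tot (r : Int × Int) => tot + min (pvAct l r.1) disc * (r.2 - r.1)) acc)
      = acc + pvSeg disc l p ds := by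
  intro ds
  induction ds with
  | nil => intro p acc; simp [pvSeg]
  | cons d ds ih =>
      intro p acc
      simp only [List.zip_cons_cons, List.foldl_cons, ih, pvSeg]
      ring

theorem pv_main (cF sF eF : Int → Int) (R : List Int) (disc M : Int) (hM : 0 < M) :
    PySem.Int.mod
      ((PySem.List.sorted
        ((R.foldl (fun d i => (d.modify (sF i) 0 (· + cF i)).modify (eF i + 1) 0 (· - cF i)) PySem.Dict.empty).keys)
        (fun x => x) false).foldl
        (fun st day =>
          ((match st.2.2 with
            | none => st.1
            | some p => PySem.Int.mod (st.1 + min st.2.1 disc * (day - p)) M),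
           st.2.1 + (R.foldl (fun d i => (d.modify (sF i) 0 (· + cF i)).modify (eF i + 1) 0 (· - cF i)) PySem.Dict.empty).getD day 0,
           some day))
        ((0 : Int), (0 : Int), (none : Option Int))).1 M
    =
    PySem.Int.mod
      (((PySem.List.sorted (PySem.Set.union (PySem.Set.ofList (R.map sF)) (R.map (fun i => eF i + 1))) (fun x => x) false).zip
        (PySem.List.slice (PySem.List.sorted (PySem.Set.union (PySem.Set.ofList (R.map sF)) (R.map (fun i => eF i + 1))) (fun x => x) false) (some 1) none)).foldl
        (fun tot r =>
          tot + min (((R.filter (fun i => decide (sF i ≤ r.1))).map cF).sum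
            - ((R.filter (fun i => decide (eF i < r.1))).map cF).sum) disc * (r.2 - r.1)) 0) M := by
  rw [pv_events_eq cF sF eF R PySem.Dict.empty]
  set l : List (Int × Int) := pvPairs cF sF eF R with hl
  have hgetD : ∀ k, (l.foldl (fun d r => d.modify r.1 0 (· + r.2)) PySem.Dict.empty).getD k 0 = pvG l k := by
    intro k; rw [pv_modfold_getD]; simp
  have hdays : PySem.List.sorted (PySem.Set.union (PySem.Set.ofList (R.map sF)) (R.map (fun i => eF i + 1))) (fun x => x) false
      = PySem.List.sorted (PySem.Set.ofList (l.map Prod.fst)) (fun x => x) false := by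
    apply PySem.List.sorted_eq_sorted_of_perm _ _ _ (fun a b h => h)
    rw [List.perm_ext_iff_of_nodup (PySem.Set.nodup_union _ _ (PySem.Set.nodup_ofList _)) (PySem.Set.nodup_ofList _)]
    intro a
    rw [PySem.Set.mem_union, PySem.Set.mem_ofList, PySem.Set.mem_ofList, hl, pv_mem_fst]
  rw [pv_modfold_keys, hdays, PySem.List.slice_from_one]
  set D : List Int := PySem.List.sorted (PySem.Set.ofList (l.map Prod.fst)) (fun x => x) false with hD
  have hDpw : D.Pairwise (· < ·) := PySem.List.sorted_ofList_pairwise_lt _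
  have hfA : D.foldl
      (fun st day =>
        ((match st.2.2 with
          | none => st.1
          | some p => PySem.Int.mod (st.1 + min st.2.1 disc * (day - p)) M),
         st.2.1 + (l.foldl (fun d r => d.modify r.1 0 (· + r.2)) PySem.Dict.empty).getD day 0,
         some day)) ((0 : Int), (0 : Int), (none : Option Int))
      = D.foldl (pvStepA disc M (pvG l)) ((0 : Int), (0 : Int), (none : Option Int)) := by
    apply PySem.List.foldl_congr_mem
    intro acc x _
    simp [pvStepA, hgetD]
  have hfB : (D.zip D.tail).foldl
      (fun tot r =>
        tot + min (((R.filter (fun i => decide (sF i ≤ r.1))).map cF).sum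
          - ((R.filter (fun i => decide (eF i < r.1))).map cF).sum) disc * (r.2 - r.1)) (0 : Int)
      = (D.zip D.tail).foldl (fun tot (r : Int × Int) => tot + min (pvAct l r.1) disc * (r.2 - r.1)) (0 : Int) := by
    apply PySem.List.foldl_congr_mem
    intro acc r _
    rw [hl, pv_act_B]
  rw [hfA, hfB]
  cases hDc : D with
  | nil => simp [PySem.Int.mod_eq_emod_of_pos hM]
  | cons d0 rest =>
      have hd0le : ∀ y ∈ l.map Prod.fst, d0 ≤ y := by
        intro y hy
        have hsorted : PySem.List.sorted (PySem.Set.ofList (l.map Prod.fst)) (fun x => x) false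
            = d0 :: rest := by rw [← hD]; exact hDc
        exact PySem.List.key_head_sorted_le (PySem.Set.ofList (l.map Prod.fst)) (fun x => x)
          hsorted y ((PySem.Set.mem_ofList _ _).mpr hy)
      have hpwc := hDc ▸ hDpw
      have hrest_lt : ∀ d ∈ rest, d0 < d := fun d hd => (List.pairwise_cons.mp hpwc).1 d hd
      have hrest_pw : rest.Pairwise (· < ·) := (List.pairwise_cons.mp hpwc).2
      have hDmem : ∀ x, x ∈ D ↔ x ∈ l.map Prod.fst := by
        intro x; rw [hD, PySem.List.mem_sorted, PySem.Set.mem_ofList]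
      have hkeys_in : ∀ k, k ∈ l.map Prod.fst → d0 < k → k ∈ rest := by
        intro k hk hlt
        have hkD : k ∈ D := (hDmem k).mpr hk
        rw [hDc] at hkD
        rcases List.mem_cons.mp hkD with h | h
        · omega
        · exact h
      have hstep1 : pvStepA disc M (pvG l) ((0 : Int), (0 : Int), (none : Option Int)) d0
          = (PySem.Int.mod 0 M, pvAct l d0, some d0) := by
        simp [pvStepA, pv_act_head l d0 hd0le, PySem.Int.mod_eq_emod_of_pos hM]
      rw [List.foldl_cons, hstep1,
        pv_loopA disc M hM l rest d0 0 hrest_lt hkeys_in hrest_pw,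
        List.tail_cons, pv_loopB]
      simp only [PySem.Int.mod_eq_emod_of_pos hM, zero_add, Int.emod_emod_of_dvd _ dvd_rfl]

-- ===== VERDICT (by name: the statement is the Claim_ definition above) =====
theorem getMinProcessingCost_spec : Claim_equal_getMinProcessingCost := by
  intro filterCost startDay endDay discountPrice _ _
  unfold Spec_getMinProcessingCost getMinProcessingCost getMinProcessingCost_alt
  exact pv_main (fun i => PySem.List.pyGetD filterCost i 0) (fun i => PySem.List.pyGetD startDay i 0)
    (fun i => PySem.List.pyGetD endDay i 0) (PySem.List.pyRange 0 (filterCost.length : Int) 1)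
    discountPrice 1000000007 (by norm_num)
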